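-- pv_equiv track=rewrite | github.com/spektraAI/model | src/utils/build_phrase.py | reconstruir_frase
-- ===== SOURCE A (Python) =====
-- from collections import Counter
--
-- def reconstruir_frase(clasificacion):
--     prefix, frases_scores = clasificacion
--     # add temperature
--     # obtener frases válidas
--     sentences = [s for s in frases_scores.keys() if s.strip()]
--
--     split_sentences = [s.split() for s in sentences]
--     max_len = max(len(s) for s in split_sentences)
--
--     result = []
--
--     for i in range(max_len):
--         words = [s[i] for s in split_sentences if len(s) > i]
--         word = Counter(words).most_common(1)[0][0]
--         result.append(word)
--
--     return result, " ".join(result)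
-- ===== SOURCE B (Python) =====
-- def reconstruir_frase(clasificacion):
--     # Single pass over all words: per-position count dicts built in sentence
--     # order, instead of rescanning every sentence once per position.
--     prefix, frases_scores = clasificacion
--     counts = []  # counts[i]: dict word -> occurrences at position i, insertion-ordered
--     for s in frases_scores.keys():
--         if not s.strip():
--             continue
--         for i, w in enumerate(s.split()):
--             if i == len(counts):
--                 counts.append({})
--             d = counts[i]
--             d[w] = d.get(w, 0) + 1
--     result = [max(d.items(), key=lambda kv: kv[1])[0] for d in counts]
--     return result, " ".join(result)
-- ===== Notes on version B (the rewrite author's own statement) =====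
-- stated objective: alternative
-- what changed: Instead of looping over positions 0..max_len-1 and rescanning every split sentence to build a Counter per position, B makes one pass over all words, maintaining a per-position count dict in sentence order, then takes the first-maximal word of each dict.
import Mathlib
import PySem

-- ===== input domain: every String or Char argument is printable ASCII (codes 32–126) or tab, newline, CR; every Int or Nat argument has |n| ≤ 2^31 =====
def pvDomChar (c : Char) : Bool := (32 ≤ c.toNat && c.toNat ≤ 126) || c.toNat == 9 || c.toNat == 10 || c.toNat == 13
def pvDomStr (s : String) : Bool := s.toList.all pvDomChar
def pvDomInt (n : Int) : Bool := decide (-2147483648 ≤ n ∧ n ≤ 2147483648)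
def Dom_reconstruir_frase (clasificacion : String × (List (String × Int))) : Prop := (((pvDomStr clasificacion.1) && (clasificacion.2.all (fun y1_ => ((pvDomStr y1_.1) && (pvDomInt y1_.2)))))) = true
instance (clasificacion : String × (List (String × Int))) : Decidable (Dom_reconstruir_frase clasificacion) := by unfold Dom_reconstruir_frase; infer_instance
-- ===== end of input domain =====

-- B replaces A's per-position rescans of all sentences by one pass over all words
-- with per-position count dicts (objective: alternative single-pass algorithm).

-- ===== PORT A =====
-- Literal port of A: sentences = non-blank keys; for each i in range(max_len),
-- collect the i-th word of each long-enough sentence, Counter it, and take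
-- most_common(1)[0][0] (= head of the stable sort of items by count, descending).
def reconstruir_frase (clasificacion : String × (List (String × Int))) : List String × String :=
  let sentences := (PySem.Dict.ofList clasificacion.2).keys.filter (fun s => PySem.Str.strip s ≠ "")
  let split_sentences := sentences.map PySem.Str.split₀
  -- Python's max(...) raises on an empty sequence; Pre_ excludes that, .getD 0 is unreachable there
  let max_len := (PySem.List.max? (split_sentences.map (·.length)) (fun n => n)).getD 0
  let result := (List.range max_len).foldl
    (fun res i =>
      let words := split_sentences.filterMap (fun s => s[i]?)  -- [s[i] for s in split_sentences if len(s) > i]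
      -- Counter(words).most_common(1)[0][0]; [0] cannot fail here since words ≠ [] for i < max_len
      let word := (((PySem.List.sorted (PySem.Dict.counter words).items (fun kv => kv.2) true).head?).map (·.1)).getD ""
      res ++ [word]) []
  (result, PySem.Str.join " " result)

-- ===== PORT B =====
-- the enumerate loop of Source B: walk the words of one sentence, consuming the
-- count-dict list positionally and appending a fresh dict when the position is new
def pvBump (counts : List (PySem.Dict String Int)) (ws : List String) : List (PySem.Dict String Int) :=
  match counts, ws with
  | cs, [] => cs
  | [], w :: ws' => (PySem.Dict.empty.modify w 0 (· + 1)) :: pvBump [] ws'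
  | c :: cs, w :: ws' => (c.modify w 0 (· + 1)) :: pvBump cs ws'

def reconstruir_frase_alt (clasificacion : String × (List (String × Int))) : List String × String :=
  let sentences := (PySem.Dict.ofList clasificacion.2).keys.filter (fun s => PySem.Str.strip s ≠ "")
  let counts := sentences.foldl (fun cs s => pvBump cs (PySem.Str.split₀ s)) []
  -- max(d.items(), key=count)[0]: max? is Python's first-maximal max(); every d here is nonempty
  let result := counts.map (fun d => ((PySem.List.max? d.items (fun kv => kv.2)).map (·.1)).getD "")
  (result, PySem.Str.join " " result)

-- ===== PRECONDITION & SPEC =====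
-- Pre_ excludes exactly the inputs where A raises: no key with non-whitespace
-- content, so max() is applied to an empty sequence (ValueError).
def Pre_reconstruir_frase (clasificacion : String × (List (String × Int))) : Prop :=
  ∃ p ∈ clasificacion.2, PySem.Str.strip p.1 ≠ ""
instance (clasificacion : String × (List (String × Int))) : Decidable (Pre_reconstruir_frase clasificacion) := by unfold Pre_reconstruir_frase; infer_instance
def pvWitness_reconstruir_frase : (String × (List (String × Int))) := ("p", [("a b", 1), ("c b", 2)])

def Spec_reconstruir_frase (clasificacion : String × (List (String × Int))) (out : List String × String) : Prop := out = reconstruir_frase_alt clasificacion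
instance (clasificacion : String × (List (String × Int))) (out : List String × String) : Decidable (Spec_reconstruir_frase clasificacion out) := by unfold Spec_reconstruir_frase; infer_instance

-- ===== CLAIM (what is proved, stated in full; the proofs are below) =====
def Claim_equal_reconstruir_frase : Prop := ∀ (clasificacion : String × (List (String × Int))), Dom_reconstruir_frase clasificacion → Pre_reconstruir_frase clasificacion → Spec_reconstruir_frase clasificacion (reconstruir_frase clasificacion)
-- ===== LEMMAS AND PROOFS =====

def pvIns (d : PySem.Dict String Int) (w : String) : PySem.Dict String Int := d.modify w 0 (· + 1)

theorem pvBump_length (ws : List String) : ∀ (cs : List (PySem.Dict String Int)),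
    (pvBump cs ws).length = max cs.length ws.length := by
  induction ws with
  | nil => intro cs; cases cs <;> simp [pvBump]
  | cons w ws ih => intro cs; cases cs <;> simp [pvBump, ih]

theorem pvBump_getD (ws : List String) : ∀ (cs : List (PySem.Dict String Int)) (i : Nat),
    (pvBump cs ws).getD i PySem.Dict.empty =
      match ws[i]? with
      | some w => pvIns (cs.getD i PySem.Dict.empty) w
      | none => cs.getD i PySem.Dict.empty := by
  induction ws with
  | nil => intro cs i; cases cs <;> simp [pvBump]
  | cons w ws ih =>
    intro cs i
    cases cs with
    | nil =>
      cases i with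
      | zero => simp [pvBump, pvIns]
      | succ j => simpa [pvBump, List.getD] using ih [] j
    | cons c cs =>
      cases i with
      | zero => simp [pvBump, pvIns]
      | succ j => simpa [pvBump, List.getD] using ih cs j

theorem foldl_pvBump_length (ss : List String) : ∀ (cs : List (PySem.Dict String Int)),
    (ss.foldl (fun cs s => pvBump cs (PySem.Str.split₀ s)) cs).length =
      (ss.map (fun s => (PySem.Str.split₀ s).length)).foldl max cs.length := by
  induction ss with
  | nil => intro cs; rfl
  | cons s ss ih => intro cs; simp [List.foldl_cons, ih, pvBump_length]

theorem foldl_pvBump_getD (ss : List String) : ∀ (cs : List (PySem.Dict String Int)) (i : Nat),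
    (ss.foldl (fun cs s => pvBump cs (PySem.Str.split₀ s)) cs).getD i PySem.Dict.empty =
      (ss.filterMap (fun s => (PySem.Str.split₀ s)[i]?)).foldl pvIns (cs.getD i PySem.Dict.empty) := by
  induction ss with
  | nil => intro cs i; rfl
  | cons s ss ih =>
    intro cs i
    rw [List.foldl_cons, ih, pvBump_getD]
    cases h : (PySem.Str.split₀ s)[i]? <;> simp [h]

theorem max?_getD_eq_foldl_max (ns : List Nat) :
    (PySem.List.max? ns (fun n => n)).getD 0 = ns.foldl max 0 := by
  cases ns with
  | nil => rfl
  | cons n ns =>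
    rw [PySem.List.max?_id_cons]
    simp

theorem insertBy_foldl_head? {α κ : Type} [LT κ] [DecidableLT κ] (key : α → κ) (xs : List α) :
    ∀ (acc : List α),
    (xs.foldl (fun a x => PySem.List.insertBy (fun a b => decide (key b < key a)) x a) acc).head? =
      xs.foldl (fun m x => match m with
        | none => some x
        | some y => if key y < key x then some x else some y) acc.head? := by
  induction xs with
  | nil => intro acc; rfl
  | cons x xs ih =>
    intro acc
    rw [List.foldl_cons, List.foldl_cons, ih]
    congr 1
    cases acc with
    | nil => rfl
    | cons y ys =>
      simp only [PySem.List.insertBy, List.head?]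
      by_cases h : key y < key x <;> simp [h]

theorem head?_sorted_rev_eq_max? {α κ : Type} [LT κ] [DecidableLT κ] (xs : List α) (key : α → κ) :
    (PySem.List.sorted xs key true).head? = PySem.List.max? xs key := by
  rw [PySem.List.sorted_rev_eq_foldl_insertBy, PySem.List.max?]
  exact insertBy_foldl_head? key xs []

theorem counter_eq_foldl_pvIns (xs : List String) :
    PySem.Dict.counter xs = xs.foldl pvIns PySem.Dict.empty := rfl

-- ===== VERDICT (by name: the statement is the Claim_ definition above) =====
theorem reconstruir_frase_spec : Claim_equal_reconstruir_frase := by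
  intro clas _ _
  unfold Spec_reconstruir_frase reconstruir_frase reconstruir_frase_alt
  simp only []
  set sentences := (PySem.Dict.ofList clas.2).keys.filter (fun s => PySem.Str.strip s ≠ "") with hs
  set split_sentences := sentences.map PySem.Str.split₀ with hsp
  set counts := sentences.foldl (fun cs s => pvBump cs (PySem.Str.split₀ s)) [] with hc
  have hlen : counts.length = (PySem.List.max? (split_sentences.map (fun s => s.length)) (fun n => n)).getD 0 := by
    rw [hc, foldl_pvBump_length, max?_getD_eq_foldl_max, hsp, List.map_map]
    rfl
  have key : (List.range ((PySem.List.max? (split_sentences.map (fun s => s.length)) (fun n => n)).getD 0)).map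
        (fun i =>
          (((PySem.List.sorted (PySem.Dict.counter (split_sentences.filterMap (fun s => s[i]?))).items
              (fun kv => kv.2) true).head?).map (·.1)).getD "") =
      counts.map (fun d => ((PySem.List.max? d.items (fun kv => kv.2)).map (·.1)).getD "") := by
    apply List.ext_getElem
    · simp [hlen]
    · intro i h1 h2
      simp only [List.getElem_map, List.getElem_range]
      rw [head?_sorted_rev_eq_max?]
      congr 1
      have hi : i < counts.length := by simpa using h2
      have : counts[i] = counts.getD i PySem.Dict.empty := by
        simp [List.getD, List.getElem?_eq_getElem hi]
      rw [this, hc, foldl_pvBump_getD, counter_eq_foldl_pvIns, hsp, List.filterMap_map]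
      rfl
  rw [PySem.List.foldl_append_singleton_eq_map, List.nil_append, key]
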